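-- pv_equiv track=rewrite | github.com/josephjinpark/DecayElement-Project | old_files/B_core_miRDE.py | strcheight
-- ===== SOURCE A (Python) =====
-- def strcheight(dotbr):
--     h   = 0
--     ret = []
--     for d in dotbr:
--         if   d == '(': h += 1; ret.append(h)
--         elif d == ')': ret.append(h); h -= 1
--         else: ret.append(h)
--     return ret
-- ===== SOURCE B (Python) =====
-- from itertools import accumulate
--
-- def strcheight(dotbr):
--     bal = list(accumulate((c == '(') - (c == ')') for c in dotbr))
--     return [max(p, c) for p, c in zip([0] + bal, bal)]
-- ===== Notes on version B (the rewrite author's own statement) =====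
-- stated objective: alternative
-- what changed: Replaced the stateful branch-per-character loop by a prefix-sum (itertools.accumulate) of +1/-1/0 deltas followed by an elementwise max of each balance with its predecessor.
import Mathlib
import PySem

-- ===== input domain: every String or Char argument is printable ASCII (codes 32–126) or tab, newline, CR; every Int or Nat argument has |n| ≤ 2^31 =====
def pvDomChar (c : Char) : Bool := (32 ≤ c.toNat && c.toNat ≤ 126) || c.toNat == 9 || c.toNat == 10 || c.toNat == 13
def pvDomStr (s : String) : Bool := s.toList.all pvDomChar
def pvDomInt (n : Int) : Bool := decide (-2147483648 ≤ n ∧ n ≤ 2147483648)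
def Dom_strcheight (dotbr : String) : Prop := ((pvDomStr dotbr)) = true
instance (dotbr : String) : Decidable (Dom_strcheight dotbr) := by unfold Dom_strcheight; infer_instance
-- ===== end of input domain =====

-- B replaces A's stateful per-character branch loop by a prefix-sum of deltas plus
-- an elementwise max of each balance with its predecessor (alternative decomposition, same cost).


-- ===== PORT A =====
-- literal transliteration: fold over the characters with state (h, ret), appending as A does
def strcheight (dotbr : String) : List Int :=
  (dotbr.toList.foldl
    (fun (st : Int × List Int) d =>
      if d = '(' then (st.1 + 1, st.2 ++ [st.1 + 1])
      else if d = ')' then (st.1 - 1, st.2 ++ [st.1])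
      else (st.1, st.2 ++ [st.1]))
    (0, [])).2

-- ===== PORT B =====
-- delta of one character: +1 for '(', -1 for ')', 0 otherwise
def pvDelta (c : Char) : Int := (if c = '(' then 1 else 0) - (if c = ')' then 1 else 0)

-- running balances (Python's accumulate: no leading initial value)
def pvBalances (dotbr : String) : List Int :=
  ((dotbr.toList.map pvDelta).scanl (· + ·) 0).tail

def strcheight_alt (dotbr : String) : List Int :=
  (List.zip (0 :: pvBalances dotbr) (pvBalances dotbr)).map (fun p => max p.1 p.2)

-- ===== PRECONDITION & SPEC =====
def Spec_strcheight (dotbr : String) (out : List Int) : Prop := out = strcheight_alt dotbr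
instance (dotbr : String) (out : List Int) : Decidable (Spec_strcheight dotbr out) := by unfold Spec_strcheight; infer_instance

-- ===== CLAIM (what is proved, stated in full; the proofs are below) =====
def Claim_equal_strcheight : Prop := ∀ (dotbr : String), Dom_strcheight dotbr → Spec_strcheight dotbr (strcheight dotbr)

-- ===== LEMMAS AND PROOFS =====

-- common recursive characterisation: heights of cs starting from balance h
def pvSpecList (h : Int) : List Char → List Int
  | [] => []
  | c :: cs => max h (h + pvDelta c) :: pvSpecList (h + pvDelta c) cs

-- generalized balances from an arbitrary starting balance
def pvBalAux (h : Int) (cs : List Char) : List Int :=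
  ((cs.map pvDelta).scanl (· + ·) h).tail

theorem pvBalAux_cons (h : Int) (c : Char) (cs : List Char) :
    pvBalAux h (c :: cs) = (h + pvDelta c) :: pvBalAux (h + pvDelta c) cs := by
  cases cs <;> simp [pvBalAux, List.scanl]

theorem pvB_eq (cs : List Char) : ∀ h : Int,
    (List.zip (h :: pvBalAux h cs) (pvBalAux h cs)).map (fun p => max p.1 p.2)
      = pvSpecList h cs := by
  induction cs with
  | nil => intro h; simp [pvBalAux, pvSpecList]
  | cons c cs ih =>
      intro h
      rw [pvBalAux_cons]
      simp only [List.zip_cons_cons, List.map_cons, pvSpecList]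
      exact congrArg _ (ih (h + pvDelta c))

theorem pvA_eq (cs : List Char) : ∀ (h : Int) (acc : List Int),
    (cs.foldl
      (fun (st : Int × List Int) d =>
        if d = '(' then (st.1 + 1, st.2 ++ [st.1 + 1])
        else if d = ')' then (st.1 - 1, st.2 ++ [st.1])
        else (st.1, st.2 ++ [st.1]))
      (h, acc)).2 = acc ++ pvSpecList h cs := by
  induction cs with
  | nil => intro h acc; simp [pvSpecList]
  | cons c cs ih =>
      intro h acc
      simp only [List.foldl_cons, pvSpecList]
      by_cases hc1 : c = '('
      · simp only [hc1, ih]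
        have : pvDelta '(' = 1 := by decide
        rw [this]
        have hm : max h (h + 1) = h + 1 := by omega
        rw [hm]; simp
      · by_cases hc2 : c = ')'
        · simp only [hc2, if_neg (by decide : ¬ (')' = '(')), ih]
          have : pvDelta ')' = -1 := by decide
          rw [this]
          have hm : max h (h + -1) = h := by omega
          rw [hm]; simp [sub_eq_add_neg]
        · rw [if_neg hc1, if_neg hc2, ih]
          have hd : pvDelta c = 0 := by simp [pvDelta, hc1, hc2]
          rw [hd]
          have hm : max h (h + 0) = h := by omega
          rw [hm]; simp

-- ===== VERDICT (by name: the statement is the Claim_ definition above) =====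
theorem strcheight_spec : Claim_equal_strcheight := by
  intro dotbr _
  show strcheight dotbr = strcheight_alt dotbr
  rw [strcheight, strcheight_alt, pvA_eq]
  have : pvBalances dotbr = pvBalAux 0 dotbr.toList := rfl
  rw [this, pvB_eq]
  simp
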